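-- pv_equiv track=rewrite | github.com/BaBaBunny/QHacks-2026-Chrome-Extension | worker/src/services/gradium_stt.py | _merge_transcript_parts
-- ===== SOURCE A (Python) =====
-- def _normalize_text(text: str) -> str:
--     return " ".join(text.split()).strip().lower()
--
-- def _merge_transcript_parts(parts: list[str]) -> str:
--     if not parts:
--         return ""
--
--     merged_parts: list[str] = []
--     seen: set[str] = set()
--     last_key = ""
--
--     for piece in parts:
--         cleaned_piece = piece.strip()
--         if not cleaned_piece:
--             continue
--         key = _normalize_text(cleaned_piece)
--         if not key or key in seen:
--             continue
--
--         # Streaming providers often send growing snapshots; keep the most complete one.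
--         if last_key and key.startswith(last_key):
--             merged_parts[-1] = cleaned_piece
--             seen.add(key)
--             last_key = key
--             continue
--
--         merged_parts.append(cleaned_piece)
--         seen.add(key)
--         last_key = key
--
--     return " ".join(" ".join(merged_parts).split()).strip()
-- ===== SOURCE B (Python) =====
-- def _normalize_text(text: str) -> str:
--     return " ".join(text.split()).strip().lower()
--
-- def _merge_transcript_parts(parts: list[str]) -> str:
--     # Pass 1: filter/dedup -> list of (cleaned_piece, key), keys nonempty and distinct.
--     entries = []
--     seen = set()
--     for piece in parts:
--         cleaned = piece.strip()
--         key = _normalize_text(cleaned)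
--         if key and key not in seen:
--             seen.add(key)
--             entries.append((cleaned, key))
--     # Pass 2: collapse growing snapshots pairwise — keep an entry unless the NEXT
--     # entry's key extends its key (no last_key state, no in-place replacement).
--     kept = [c for (c, k), (_, nk) in zip(entries, entries[1:]) if not nk.startswith(k)]
--     if entries:
--         kept.append(entries[-1][0])
--     return " ".join(" ".join(kept).split()).strip()
-- ===== Notes on version B (the rewrite author's own statement) =====
-- stated objective: alternative
-- what changed: A's single stateful loop (seen-set + last_key + in-place replacement of merged_parts[-1]) is split into a filter/dedup pass collecting (cleaned, key) entries and a stateless pairwise collapse that keeps an entry unless the next entry's key extends its key.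
import Mathlib
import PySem

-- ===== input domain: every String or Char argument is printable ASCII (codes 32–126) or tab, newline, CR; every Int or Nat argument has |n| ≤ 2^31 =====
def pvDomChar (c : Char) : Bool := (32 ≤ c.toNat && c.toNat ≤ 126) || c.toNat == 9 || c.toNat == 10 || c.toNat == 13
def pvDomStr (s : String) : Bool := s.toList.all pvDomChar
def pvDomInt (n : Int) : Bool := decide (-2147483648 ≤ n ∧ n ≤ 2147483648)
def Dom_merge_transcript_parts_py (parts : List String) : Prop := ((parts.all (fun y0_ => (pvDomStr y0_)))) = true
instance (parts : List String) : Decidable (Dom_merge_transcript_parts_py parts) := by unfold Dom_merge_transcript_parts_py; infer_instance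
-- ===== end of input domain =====

-- B replaces A's stateful last_key/in-place-replacement loop by two passes: a filter/dedup
-- pass collecting (cleaned, key) entries, then a stateless pairwise (zip-with-next) collapse;
-- objective: alternative decomposition, same cost.

-- ===== PORT A =====
-- _normalize_text: " ".join(text.split()).strip().lower()
def pvNorm (text : String) : String :=
  PySem.Str.lower (PySem.Str.strip (PySem.Str.join " " (PySem.Str.split₀ text)))

-- one iteration of A's loop; state = (merged_parts, seen, last_key)
def pvStepA (st : List String × PySem.Set String × String) (piece : String) :
    List String × PySem.Set String × String :=
  let cleaned := PySem.Str.strip piece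
  if cleaned == "" then st
  else
    let key := pvNorm cleaned
    if key == "" || PySem.Set.contains st.2.1 key then st
    else if st.2.2 != "" && PySem.Str.startswith key st.2.2 then
      (PySem.List.pySetD st.1 (-1) cleaned, PySem.Set.add st.2.1 key, key)
    else
      (st.1 ++ [cleaned], PySem.Set.add st.2.1 key, key)

def merge_transcript_parts_py (parts : List String) : String :=
  if parts == [] then ""
  else
    let st := parts.foldl pvStepA ([], PySem.Set.empty, "")
    PySem.Str.strip (PySem.Str.join " " (PySem.Str.split₀ (PySem.Str.join " " st.1)))

-- ===== PORT B =====
-- pass 1: one iteration collecting (cleaned, key), deduped by key; state = (entries, seen)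
def pvStepB (st : List (String × String) × PySem.Set String) (piece : String) :
    List (String × String) × PySem.Set String :=
  let cleaned := PySem.Str.strip piece
  let key := pvNorm cleaned
  if key != "" && !(PySem.Set.contains st.2 key) then
    (st.1 ++ [(cleaned, key)], PySem.Set.add st.2 key)
  else st

def merge_transcript_parts_py_alt (parts : List String) : String :=
  let entries := (parts.foldl pvStepB ([], PySem.Set.empty)).1
  -- pass 2: keep an entry unless the next entry's key extends its key; the last entry is kept
  let kept := ((entries.zip entries.tail).filterMap
      (fun p => if PySem.Str.startswith p.2.2 p.1.2 then none else some p.1.1))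
    ++ (match entries.getLast? with | some e => [e.1] | none => [])
  PySem.Str.strip (PySem.Str.join " " (PySem.Str.split₀ (PySem.Str.join " " kept)))

-- ===== PRECONDITION & SPEC =====
def Spec_merge_transcript_parts_py (parts : List String) (out : String) : Prop := out = merge_transcript_parts_py_alt parts
instance (parts : List String) (out : String) : Decidable (Spec_merge_transcript_parts_py parts out) := by unfold Spec_merge_transcript_parts_py; infer_instance

-- ===== CLAIM (what is proved, stated in full; the proofs are below) =====
def Claim_equal_merge_transcript_parts_py : Prop := ∀ (parts : List String), Dom_merge_transcript_parts_py parts → Spec_merge_transcript_parts_py parts (merge_transcript_parts_py parts)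

-- ===== LEMMAS AND PROOFS =====

-- recursive form of B's pairwise collapse (proof helper)
def pvKeptR : List (String × String) → List String
  | [] => []
  | [e] => [e.1]
  | e :: e' :: rest =>
      (if PySem.Str.startswith e'.2 e.2 then [] else [e.1]) ++ pvKeptR (e' :: rest)

def pvLastKey (es : List (String × String)) : String := (es.getLast?.map Prod.snd).getD ""

lemma pvKept_eq (es : List (String × String)) :
    ((es.zip es.tail).filterMap
      (fun p => if PySem.Str.startswith p.2.2 p.1.2 then none else some p.1.1))
    ++ (match es.getLast? with | some e => [e.1] | none => []) = pvKeptR es := by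
  induction es with
  | nil => rfl
  | cons e t ih =>
    cases t with
    | nil => rfl
    | cons e' rest =>
      simp only [pvKeptR, List.tail_cons, List.zip_cons_cons, List.filterMap_cons,
        List.getLast?_cons_cons]
      rw [← ih]
      by_cases h : PySem.Chars.startswith e'.2.toList e.2.toList <;>
        simp [PySem.Str.startswith, h]

lemma pvKeptR_ne_nil (es : List (String × String)) (h : es ≠ []) : pvKeptR es ≠ [] := by
  induction es with
  | nil => exact absurd rfl h
  | cons e t ih =>
    cases t with
    | nil => simp [pvKeptR]
    | cons e' rest =>
      simp only [pvKeptR]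
      intro hc
      exact (ih (by simp)) (by simpa using (List.append_eq_nil_iff.mp hc).2)

lemma startswith_empty (k : String) : PySem.Str.startswith k "" = true := by
  simp [PySem.Str.startswith, PySem.Chars.startswith]

lemma set_last (xs : List String) (v : String) :
    xs.set (xs.length - 1) v = xs.dropLast ++ [v] ∨ xs = [] := by
  induction xs with
  | nil => exact Or.inr rfl
  | cons a t ih =>
    cases t with
    | nil => exact Or.inl (by simp)
    | cons b t' =>
      left
      rcases ih with h | h
      · simpa using h
      · simp at h

lemma pySetD_neg_one (xs : List String) (h : xs ≠ []) (v : String) :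
    PySem.List.pySetD xs (-1) v = xs.dropLast ++ [v] := by
  have hl : 0 < xs.length := List.length_pos_iff.mpr h
  have hidx : PySem.List.pyIdx? xs.length (-1) = some (xs.length - 1) := by
    simp [PySem.List.pyIdx?]; omega
  have hset := (set_last xs v).resolve_right h
  simp [PySem.List.pySetD, PySem.List.pySet?, hidx, hset]

lemma pvLastKey_append (es : List (String × String)) (e : String × String) :
    pvLastKey (es ++ [e]) = e.2 := by
  simp [pvLastKey]

lemma pvKeptR_append (es : List (String × String)) (c k : String) :
    pvKeptR (es ++ [(c, k)]) =
      if PySem.Str.startswith k (pvLastKey es) then (pvKeptR es).dropLast ++ [c]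
      else pvKeptR es ++ [c] := by
  induction es with
  | nil => simp [pvKeptR, pvLastKey, startswith_empty]
  | cons e t ih =>
    cases t with
    | nil =>
      simp only [List.cons_append, List.nil_append, pvKeptR, pvLastKey]
      by_cases h : PySem.Chars.startswith k.toList e.2.toList <;>
        simp [PySem.Str.startswith, h, pvKeptR]
    | cons e' rest =>
      have hlk : pvLastKey (e :: e' :: rest) = pvLastKey (e' :: rest) := by
        simp [pvLastKey]
      simp only [List.cons_append, pvKeptR]
      rw [← List.cons_append, ih, hlk]
      by_cases h : PySem.Str.startswith k (pvLastKey (e' :: rest))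
      · simp only [h, if_true]
        by_cases h2 : PySem.Chars.startswith e'.2.toList e.2.toList
        · simp [PySem.Str.startswith, h2]
        · simp only [PySem.Str.startswith, h2, Bool.false_eq_true, if_false]
          rw [List.dropLast_append_of_ne_nil (pvKeptR_ne_nil _ (by simp)), List.append_assoc]
      · simp only [h, if_false]
        by_cases h2 : PySem.Chars.startswith e'.2.toList e.2.toList <;>
          simp [PySem.Str.startswith, h2]

lemma pvLastKey_ne_empty (es : List (String × String)) (hne : es ≠ [])
    (hk : ∀ e ∈ es, e.2 ≠ "") : pvLastKey es ≠ "" := by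
  have h := List.getLast?_eq_some_getLast (l := es) hne
  simp [pvLastKey, h]
  exact hk _ (List.getLast_mem hne)

lemma pvNorm_empty : pvNorm "" = "" := by decide

-- one step of A on the abstracted state = one step of B, abstracted
lemma step_sim (es : List (String × String)) (seen : PySem.Set String) (piece : String)
    (hk : ∀ e ∈ es, e.2 ≠ "") :
    pvStepA (pvKeptR es, seen, pvLastKey es) piece =
      (pvKeptR (pvStepB (es, seen) piece).1, (pvStepB (es, seen) piece).2,
        pvLastKey (pvStepB (es, seen) piece).1) := by
  by_cases hc : PySem.Str.strip piece = ""
  · simp [pvStepA, pvStepB, hc, pvNorm_empty]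
  · by_cases hkey : pvNorm (PySem.Str.strip piece) = ""
    · simp [pvStepA, pvStepB, hc, hkey]
    · by_cases hseen : pvNorm (PySem.Str.strip piece) ∈ seen
      · simp [pvStepA, pvStepB, hc, hkey, hseen]
      · rcases eq_or_ne es [] with he | he
        · subst he
          simp [pvStepA, pvStepB, hc, hkey, hseen, pvLastKey, pvKeptR]
        · have hlk := pvLastKey_ne_empty es he hk
          by_cases hst :
              PySem.Chars.startswith (pvNorm (PySem.Str.strip piece)).toList (pvLastKey es).toList
          · simp [pvStepA, pvStepB, hc, hkey, hseen, hlk, hst, PySem.Str.startswith,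
              pvKeptR_append, pvLastKey_append, pySetD_neg_one _ (pvKeptR_ne_nil es he)]
          · simp [pvStepA, pvStepB, hc, hkey, hseen, hlk, hst, PySem.Str.startswith,
              pvKeptR_append, pvLastKey_append]

lemma stepB_keys (es : List (String × String)) (seen : PySem.Set String) (piece : String)
    (hk : ∀ e ∈ es, e.2 ≠ "") : ∀ e ∈ (pvStepB (es, seen) piece).1, e.2 ≠ "" := by
  simp only [pvStepB]
  by_cases h : (pvNorm (PySem.Str.strip piece) != "" &&
      !PySem.Set.contains seen (pvNorm (PySem.Str.strip piece))) = true
  · simp only [h, if_true]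
    intro e he
    rcases List.mem_append.mp he with h1 | h1
    · exact hk e h1
    · simp at h1
      subst h1
      simpa using (Bool.and_elim_left h)
  · simp only [h, if_false]
    exact hk

lemma fold_sim (parts : List String) :
    ∀ (es : List (String × String)) (seen : PySem.Set String), (∀ e ∈ es, e.2 ≠ "") →
    parts.foldl pvStepA (pvKeptR es, seen, pvLastKey es) =
      (pvKeptR (parts.foldl pvStepB (es, seen)).1, (parts.foldl pvStepB (es, seen)).2,
        pvLastKey (parts.foldl pvStepB (es, seen)).1) := by
  induction parts with
  | nil => intro es seen hk; rfl
  | cons p t ih =>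
    intro es seen hk
    simp only [List.foldl_cons]
    rw [step_sim es seen p hk]
    have hkeys := stepB_keys es seen p hk
    have := ih (pvStepB (es, seen) p).1 (pvStepB (es, seen) p).2 hkeys
    simpa using this

-- ===== VERDICT (by name: the statement is the Claim_ definition above) =====
theorem merge_transcript_parts_py_spec : Claim_equal_merge_transcript_parts_py := by
  intro parts _
  unfold Spec_merge_transcript_parts_py
  rcases eq_or_ne parts [] with h | h
  · subst h; rfl
  · have hf := fold_sim parts [] (PySem.Set.empty : PySem.Set String) (by simp)
    have e1 : pvKeptR ([] : List (String × String)) = [] := rfl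
    have e2 : pvLastKey ([] : List (String × String)) = "" := rfl
    rw [e1, e2] at hf
    simp only [merge_transcript_parts_py, merge_transcript_parts_py_alt, beq_iff_eq,
      if_neg h]
    rw [hf, pvKept_eq]
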